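-- pv_equiv track=rewrite | github.com/knader10/kampeonato | campeonato/api_views.py | _gerar_confrontos_round_robin
-- ===== SOURCE A (Python) =====
-- def _gerar_confrontos_round_robin(times, numero_rodada):
--     """Gera confrontos para uma rodada específica usando algoritmo round-robin"""
--     n = len(times)
--     if n < 2:
--         return []
--
--     # Se número ímpar de times, adicionar time "fantasma"
--     if n % 2 == 1:
--         times = times + [None]
--         n += 1
--
--     # Algoritmo round-robin
--     confrontos = []
--     for rodada in range(1, n):
--         rodada_confrontos = []
--         for i in range(n // 2):
--             time1_idx = i
--             time2_idx = n - 1 - i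
--
--             if rodada == numero_rodada:
--                 time1 = times[time1_idx]
--                 time2 = times[time2_idx]
--
--                 # Verificar se não é time fantasma
--                 if time1 is not None and time2 is not None:
--                     confrontos.append((time1, time2))
--
--         # Rotacionar times (exceto o primeiro)
--         times = [times[0]] + [times[-1]] + times[1:-1]
--
--     return confrontos
-- ===== SOURCE B (Python) =====
-- def _gerar_confrontos_round_robin(times, numero_rodada):
--     """Gera confrontos para uma rodada especifica: calcula a rotacao da rodada
--     diretamente por aritmetica de indices (uma passada), em vez de simular todas as rodadas."""
--     n = len(times)
--     if n < 2:
--         return []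
--     odd = (n % 2 == 1)
--     if odd:
--         n += 1
--     if not (1 <= numero_rodada <= n - 1):
--         return []
--     k = numero_rodada - 1
--     m = n - 1
--
--     def at(j):
--         if j == 0:
--             return times[0]
--         idx = (j - 1 - k) % m
--         if odd and idx == m - 1:
--             return None
--         return times[idx + 1]
--
--     confrontos = []
--     for i in range(n // 2):
--         t1 = at(i)
--         t2 = at(n - 1 - i)
--         if t1 is not None and t2 is not None:
--             confrontos.append((t1, t2))
--     return confrontos
-- ===== Notes on version B (the rewrite author's own statement) =====
-- stated objective: faster
-- what changed: Instead of simulating all n-1 round-robin rotations in a nested loop, B computes the target round's rotation state directly by index arithmetic ((j-1-k) mod (n-1)) and emits the pairs in a single pass.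
import Mathlib
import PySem

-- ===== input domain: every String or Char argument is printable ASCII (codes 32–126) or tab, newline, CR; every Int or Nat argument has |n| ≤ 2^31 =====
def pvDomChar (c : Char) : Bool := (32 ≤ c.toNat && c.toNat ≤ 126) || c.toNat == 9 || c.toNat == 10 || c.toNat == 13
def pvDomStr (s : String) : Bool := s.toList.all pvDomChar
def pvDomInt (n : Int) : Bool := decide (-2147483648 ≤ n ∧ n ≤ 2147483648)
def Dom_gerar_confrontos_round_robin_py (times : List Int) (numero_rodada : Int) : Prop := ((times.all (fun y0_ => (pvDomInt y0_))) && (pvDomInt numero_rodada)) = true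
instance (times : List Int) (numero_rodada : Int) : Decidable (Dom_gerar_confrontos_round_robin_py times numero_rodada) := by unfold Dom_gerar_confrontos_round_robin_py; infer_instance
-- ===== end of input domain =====

-- B computes the rotation state of the requested round directly by index arithmetic
-- (one pass) instead of simulating all n-1 rounds of A's round-robin loop.

-- ===== PORT A =====
-- rotation step: times = [times[0]] + [times[-1]] + times[1:-1]
def pvRotA (ts : List (Option Int)) : List (Option Int) :=
  [(PySem.List.pyGet? ts 0).getD none] ++ [(PySem.List.pyGet? ts (-1)).getD none]
    ++ PySem.List.slice ts (some 1) (some (-1))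

-- inner loop 'for i in range(n // 2)' of A, with the 'rodada == numero_rodada' test inside
def pvInnerA (numero_rodada n rodada : Int) (ts : List (Option Int))
    (confrontos : List (Int × Int)) : List (Int × Int) :=
  (PySem.List.pyRange 0 (PySem.Int.floordiv n 2)).foldl (fun acc i =>
    if rodada = numero_rodada then
      match (PySem.List.pyGet? ts i).getD none, (PySem.List.pyGet? ts (n - 1 - i)).getD none with
      | some t1, some t2 => acc ++ [(t1, t2)]
      | _, _ => acc
    else acc) confrontos
-- one iteration of the outer 'for rodada in range(1, n)' loop: inner loop, then rotate
def pvStepA (numero_rodada n : Int) (st : List (Int × Int) × List (Option Int)) (rodada : Int) :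
    List (Int × Int) × List (Option Int) :=
  (pvInnerA numero_rodada n rodada st.2 st.1, pvRotA st.2)
def gerar_confrontos_round_robin_py (times : List Int) (numero_rodada : Int) : List (Int × Int) :=
  let n : Int := times.length
  if n < 2 then []
  else
    let ts : List (Option Int) :=
      if PySem.Int.mod n 2 = 1 then times.map some ++ [none] else times.map some
    let n : Int := if PySem.Int.mod n 2 = 1 then n + 1 else n
    ((PySem.List.pyRange 1 n).foldl (pvStepA numero_rodada n) ([], ts)).1

-- ===== PORT B =====
-- B's helper 'at(j)': the element at position j of the round's rotated list, computed directly
def pvAtB (times : List Int) (odd : Bool) (k m j : Int) : Option Int :=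
  if j = 0 then PySem.List.pyGet? times 0
  else
    let idx := PySem.Int.mod (j - 1 - k) m
    if odd ∧ idx = m - 1 then none
    else PySem.List.pyGet? times (idx + 1)

def gerar_confrontos_round_robin_py_alt (times : List Int) (numero_rodada : Int) : List (Int × Int) :=
  let n0 : Int := times.length
  if n0 < 2 then []
  else
    let odd : Bool := PySem.Int.mod n0 2 == 1
    let n : Int := if odd then n0 + 1 else n0
    if ¬ (1 ≤ numero_rodada ∧ numero_rodada ≤ n - 1) then []
    else
      let k := numero_rodada - 1
      let m := n - 1
      (PySem.List.pyRange 0 (PySem.Int.floordiv n 2)).foldl (fun acc i =>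
        match pvAtB times odd k m i, pvAtB times odd k m (n - 1 - i) with
        | some t1, some t2 => acc ++ [(t1, t2)]
        | _, _ => acc) []

-- ===== PRECONDITION & SPEC =====
def Spec_gerar_confrontos_round_robin_py (times : List Int) (numero_rodada : Int) (out : List (Int × Int)) : Prop := out = gerar_confrontos_round_robin_py_alt times numero_rodada
instance (times : List Int) (numero_rodada : Int) (out : List (Int × Int)) : Decidable (Spec_gerar_confrontos_round_robin_py times numero_rodada out) := by unfold Spec_gerar_confrontos_round_robin_py; infer_instance

-- ===== CLAIM (what is proved, stated in full; the proofs are below) =====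
def Claim_equal_gerar_confrontos_round_robin_py : Prop := ∀ (times : List Int) (numero_rodada : Int), Dom_gerar_confrontos_round_robin_py times numero_rodada → Spec_gerar_confrontos_round_robin_py times numero_rodada (gerar_confrontos_round_robin_py times numero_rodada)

-- ===== LEMMAS AND PROOFS =====

-- the pair (or nothing) contributed by index i of A's inner loop, reading list ts
def pvGA (n : Int) (ts : List (Option Int)) (i : Int) : List (Int × Int) :=
  match (PySem.List.pyGet? ts i).getD none, (PySem.List.pyGet? ts (n - 1 - i)).getD none with
  | some t1, some t2 => [(t1, t2)]
  | _, _ => []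
def pvPairsA (n : Int) (ts : List (Option Int)) : List (Int × Int) :=
  (PySem.List.pyRange 0 (PySem.Int.floordiv n 2)).flatMap (pvGA n ts)
-- k applications of A's rotation step, in fold order
def pvRotIter : Nat → List (Option Int) → List (Option Int)
  | 0, ts => ts
  | k + 1, ts => pvRotIter k (pvRotA ts)
theorem pvRotA_cons (a : Option Int) (rest : List (Option Int)) (h : rest ≠ []) :
    pvRotA (a :: rest) = a :: rest.rotate (rest.length - 1) := by
  rcases List.eq_nil_or_concat rest with rfl | ⟨ys, y, rfl⟩
  · exact absurd rfl h
  · unfold pvRotA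
    rw [List.rotate_eq_drop_append_take (by simp)]
    simp [PySem.List.pyGet?_zero_cons, PySem.List.pyGet?_neg_one, PySem.List.slice,
      PySem.List.clampIdx]
    constructor
    · have h2 : ((a :: ys) ++ [y]).getLast? = some y := by
        exact List.getLast?_concat
      rw [List.cons_append] at h2
      rw [h2]; rfl
    · rw [if_neg (by omega), List.take_append_of_le_length (by omega)]
      simp

theorem pvRotIter_cons (k : Nat) (a : Option Int) (rest : List (Option Int)) (h : rest ≠ []) :
    pvRotIter k (a :: rest) = a :: rest.rotate ((rest.length - 1) * k) := by
  induction k generalizing rest with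
  | zero => simp [pvRotIter]
  | succ k ih =>
    show pvRotIter k (pvRotA (a :: rest)) = _
    rw [pvRotA_cons a rest h, ih _ (by simp [h, List.rotate_eq_nil_iff])]
    rw [List.length_rotate, List.rotate_rotate]
    have heq : rest.length - 1 + (rest.length - 1) * k = (rest.length - 1) * (k + 1) := by
      generalize rest.length - 1 = m; ring
    rw [heq]

theorem pvInnerA_eq (nr n rodada : Int) (ts : List (Option Int)) (acc : List (Int × Int)) :
    pvInnerA nr n rodada ts acc = if rodada = nr then acc ++ pvPairsA n ts else acc := by
  unfold pvInnerA pvPairsA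
  by_cases h : rodada = nr
  · rw [if_pos h]
    have hb : (fun (acc : List (Int × Int)) (i : Int) =>
        if rodada = nr then
          match (PySem.List.pyGet? ts i).getD none, (PySem.List.pyGet? ts (n - 1 - i)).getD none with
          | some t1, some t2 => acc ++ [(t1, t2)]
          | _, _ => acc
        else acc) = fun acc i => acc ++ pvGA n ts i := by
      funext acc i
      rw [if_pos h]
      unfold pvGA
      cases (PySem.List.pyGet? ts i).getD none <;> cases (PySem.List.pyGet? ts (n - 1 - i)).getD none <;> simp
    rw [hb, PySem.List.foldl_append_eq_flatMap]
  · rw [if_neg h]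
    have hb : (fun (acc : List (Int × Int)) (i : Int) =>
        if rodada = nr then
          match (PySem.List.pyGet? ts i).getD none, (PySem.List.pyGet? ts (n - 1 - i)).getD none with
          | some t1, some t2 => acc ++ [(t1, t2)]
          | _, _ => acc
        else acc) = fun acc _ => acc := by
      funext acc i; rw [if_neg h]
    rw [hb, List.foldl_fixed]

theorem pvLoopA (nr n : Int) : ∀ (fuel : Nat) (a : Int), (n - a).toNat = fuel →
    ∀ (acc : List (Int × Int)) (ts : List (Option Int)),
    ((PySem.List.pyRange a n).foldl (pvStepA nr n) (acc, ts)).1 =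
      if a ≤ nr ∧ nr < n then acc ++ pvPairsA n (pvRotIter (nr - a).toNat ts) else acc := by
  intro fuel
  induction fuel with
  | zero =>
    intro a ha acc ts
    have hna : n ≤ a := by omega
    have : PySem.List.pyRange a n = [] := by
      simp [PySem.List.pyRange]; omega
    rw [this, if_neg (by omega)]
    rfl
  | succ f ih =>
    intro a ha acc ts
    have hlt : a < n := by omega
    rw [PySem.List.pyRange_one_cons hlt]
    rw [List.foldl_cons]
    show ((PySem.List.pyRange (a+1) n).foldl (pvStepA nr n) (pvStepA nr n (acc, ts) a)).1 = _
    have hstep : pvStepA nr n (acc, ts) a = (pvInnerA nr n a ts acc, pvRotA ts) := rfl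
    rw [hstep, ih (a+1) (by omega), pvInnerA_eq]
    by_cases h : a = nr
    · rw [if_pos h, if_neg (by omega), if_pos (by omega)]
      subst h
      simp [pvRotIter]
    · rw [if_neg h]
      by_cases h2 : a + 1 ≤ nr ∧ nr < n
      · rw [if_pos h2, if_pos (by omega)]
        have : (nr - a).toNat = (nr - (a + 1)).toNat + 1 := by omega
        rw [this]
        rfl
      · rw [if_neg h2, if_neg (by omega)]

-- index read from the rotated tail: position j-1 of rest.rotate ((m-1)*k) is rest[(j-1-k) mod m]
theorem pvCore (a : Option Int) (rest : List (Option Int)) (hm : 1 ≤ rest.length)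
    (k j : Int) (hk : 0 ≤ k) (hj1 : 1 ≤ j) (hjn : j < (rest.length : Int) + 1) :
    PySem.List.pyGet? (pvRotIter k.toNat (a :: rest)) j
      = rest[(PySem.Int.mod (j - 1 - k) (rest.length : Int)).toNat]? := by
  have hne : rest ≠ [] := by intro h; simp [h] at hm
  rw [pvRotIter_cons _ _ _ hne]
  rw [PySem.List.pyGet?_of_nonneg _ (by omega)]
  have hjt : j.toNat = (j.toNat - 1) + 1 := by omega
  rw [hjt, List.getElem?_cons_succ]
  have hlt : j.toNat - 1 < (rest.rotate ((rest.length - 1) * k.toNat)).length := by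
    rw [List.length_rotate]; omega
  rw [List.getElem?_eq_getElem hlt, List.getElem_rotate]

  -- Nat index equality via Int
  have hmpos : (0 : Int) < (rest.length : Int) := by exact_mod_cast hm
  have hcast : ((j.toNat - 1 + (rest.length - 1) * k.toNat) % rest.length : Nat) =
      ((j - 1 - k) % (rest.length : Int)).toNat := by
    have h1 : (((j.toNat - 1 + (rest.length - 1) * k.toNat) % rest.length : Nat) : Int)
        = ((j.toNat - 1 + (rest.length - 1) * k.toNat : Nat) : Int) % (rest.length : Int) :=
      Int.natCast_mod _ _
    have h2 : ((j.toNat - 1 + (rest.length - 1) * k.toNat : Nat) : Int)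
        = (j - 1) + ((rest.length : Int) - 1) * k := by
      push_cast [Nat.cast_sub (by omega : 1 ≤ j.toNat), Nat.cast_sub hm,
        Int.toNat_of_nonneg hk]
      omega
    have h3 : (j - 1) + ((rest.length : Int) - 1) * k = (j - 1 - k) + (rest.length : Int) * k := by
      ring
    have h4 : ((j - 1 - k) + (rest.length : Int) * k) % (rest.length : Int)
        = (j - 1 - k) % (rest.length : Int) := Int.add_mul_emod_self_left _ _ _
    have h5 : ((((j - 1 - k) % (rest.length : Int)).toNat : Nat) : Int)
        = (j - 1 - k) % (rest.length : Int) :=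
      Int.toNat_of_nonneg (Int.emod_nonneg _ (by omega))
    have := h1.trans (by rw [h2, h3, h4, ← h5])
    exact_mod_cast this
  have hqlt : ((j - 1 - k) % (rest.length : Int)).toNat < rest.length := by
    have h6 := Int.emod_lt_of_pos (j - 1 - k) hmpos
    have h7 := Int.emod_nonneg (j - 1 - k) (by omega : (rest.length : Int) ≠ 0)
    omega
  rw [PySem.Int.mod_eq_emod_of_pos hmpos, List.getElem?_eq_getElem hqlt]
  simp only [hcast]

theorem pvElem (t : Int) (restT : List Int) (hr : restT ≠ []) (odd : Bool)
    (k j : Int) (hk : 0 ≤ k) (hj : 0 ≤ j)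
    (hjn : j < (restT.length : Int) + 1 + (if odd then 1 else 0)) :
    (PySem.List.pyGet? (pvRotIter k.toNat
        (some t :: (restT.map some ++ (if odd then [none] else [])))) j).getD none
      = pvAtB (t :: restT) odd k ((restT.length : Int) + (if odd then 1 else 0)) j := by
  have hrl : 1 ≤ restT.length := List.length_pos_of_ne_nil hr
  set S : List (Option Int) := restT.map some ++ (if odd then [none] else []) with hS
  have hSlen : S.length = restT.length + (if odd then 1 else 0) := by
    cases odd <;> simp [hS]
  have hSlenI : (S.length : Int) = (restT.length : Int) + (if odd then 1 else 0) := by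
    rw [hSlen]; cases odd <;> push_cast <;> simp
  have hSne : S ≠ [] := by
    intro h; rw [h] at hSlen; simp at hSlen; omega
  by_cases hj0 : j = 0
  · subst hj0
    rw [pvRotIter_cons _ _ _ hSne]
    simp [pvAtB]
  · have hj1 : 1 ≤ j := by omega
    rw [pvCore (some t) S (by omega) k j hk hj1 (by rw [hSlenI]; cases odd <;> simp_all)]
    rw [hSlenI]
    simp only [pvAtB, if_neg hj0]
    set m : Int := (restT.length : Int) + (if odd then 1 else 0) with hm
    have hmpos : 0 < m := by cases odd <;> simp [hm]; omega
    set idx : Int := PySem.Int.mod (j - 1 - k) m with hidx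
    have hidx0 : 0 ≤ idx := PySem.Int.mod_nonneg _ hmpos
    have hidxm : idx < m := PySem.Int.mod_lt _ hmpos
    cases odd with
    | false =>
      have hS' : S = restT.map some := by simp [hS]
      have hmI : m = (restT.length : Int) := by simp [hm]
      rw [hS']
      have hq : idx.toNat < restT.length := by omega
      rw [List.getElem?_map, List.getElem?_eq_getElem hq]
      simp only [Option.map_some, Option.getD_some, Bool.false_eq_true, false_and, if_false]
      rw [PySem.List.pyGet?_of_nonneg _ (by omega)]
      have : (idx + 1).toNat = idx.toNat + 1 := by omega
      rw [this, List.getElem?_cons_succ, List.getElem?_eq_getElem hq]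
    | true =>
      have hS' : S = restT.map some ++ [none] := by simp [hS]
      have hmI : m = (restT.length : Int) + 1 := by simp [hm]
      rw [hS']
      by_cases hqe : idx = m - 1
      · have hidxt : idx.toNat = (restT.map some).length := by
          simp only [List.length_map]; omega
        rw [hidxt, List.getElem?_concat_length]
        simp [hqe]
      · have hq : idx.toNat < restT.length := by omega
        rw [List.getElem?_append_left (by simpa using hq), List.getElem?_map,
          List.getElem?_eq_getElem hq]
        simp only [Option.map_some, Option.getD_some, true_and, if_neg hqe]
        rw [PySem.List.pyGet?_of_nonneg _ (by omega)]
        have hsucc : (idx + 1).toNat = idx.toNat + 1 := by omega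
        rw [hsucc, List.getElem?_cons_succ, List.getElem?_eq_getElem hq]

theorem main_eq (times : List Int) (r : Int) :
    gerar_confrontos_round_robin_py times r = gerar_confrontos_round_robin_py_alt times r := by
  by_cases hsmall : (times.length : Int) < 2
  · simp [gerar_confrontos_round_robin_py, gerar_confrontos_round_robin_py_alt, hsmall]
  · have hlen : 2 ≤ times.length := by omega
    obtain ⟨t, restT, rfl⟩ : ∃ t restT, times = t :: restT := by
      cases times with
      | nil => simp at hlen
      | cons t rs => exact ⟨t, rs, rfl⟩
    set times := t :: restT with htimes
    have hr : restT ≠ [] := by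
      intro h; rw [htimes, h] at hlen; simp at hlen
    set n0 : Int := (times.length : Int) with hn0
    set odd : Bool := (PySem.Int.mod n0 2 == 1) with hoddb
    set n : Int := if odd then n0 + 1 else n0 with hn
    set ts0 : List (Option Int) := some t :: (restT.map some ++ (if odd then [none] else [])) with hts0
    have hoddp : (PySem.Int.mod n0 2 = 1) ↔ odd = true := by rw [hoddb]; simp
    have hA : gerar_confrontos_round_robin_py times r =
        ((PySem.List.pyRange 1 n).foldl (pvStepA r n) ([], ts0)).1 := by
      show (if n0 < 2 then [] else
        ((PySem.List.pyRange 1 (if PySem.Int.mod n0 2 = 1 then n0 + 1 else n0)).foldl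
          (pvStepA r (if PySem.Int.mod n0 2 = 1 then n0 + 1 else n0))
          ([], if PySem.Int.mod n0 2 = 1 then times.map some ++ [none] else times.map some)).1) = _
      rw [if_neg hsmall]
      cases hc : odd with
      | true =>
        have hm1 : PySem.Int.mod n0 2 = 1 := hoddp.mpr hc
        rw [if_pos hm1]
        rw [hn, hts0, htimes, hc]
        rw [PySem.Int.mod_eq_emod_of_pos (by norm_num)] at hm1
        simp [hm1]
      | false =>
        have hm1 : ¬ PySem.Int.mod n0 2 = 1 := by rw [hoddp, hc]; simp
        rw [if_neg hm1]
        rw [hn, hts0, htimes, hc]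
        rw [PySem.Int.mod_eq_emod_of_pos (by norm_num)] at hm1
        simp [hm1]
    have hB : gerar_confrontos_round_robin_py_alt times r =
        (if ¬ (1 ≤ r ∧ r ≤ n - 1) then []
         else (PySem.List.pyRange 0 (PySem.Int.floordiv n 2)).foldl (fun acc i =>
            match pvAtB times odd (r - 1) (n - 1) i, pvAtB times odd (r - 1) (n - 1) (n - 1 - i) with
            | some t1, some t2 => acc ++ [(t1, t2)]
            | _, _ => acc) []) := by
      show (if n0 < 2 then [] else _) = _
      rw [if_neg hsmall]
    rw [hA, hB, pvLoopA r n (n - 1).toNat 1 rfl]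
    have hnlen : n = (restT.length : Int) + 1 + (if odd then 1 else 0) := by
      cases hc : odd <;> simp [hn, hc, hn0, htimes]
    by_cases hcond : 1 ≤ r ∧ r < n
    · rw [if_pos (by omega : (1:Int) ≤ r ∧ r < n), if_neg (by omega)]
      have hk : (0:Int) ≤ r - 1 := by omega
      have hrw : ∀ i ∈ PySem.List.pyRange 0 (PySem.Int.floordiv n 2), ∀ acc : List (Int × Int),
          (match pvAtB times odd (r - 1) (n - 1) i, pvAtB times odd (r - 1) (n - 1) (n - 1 - i) with
            | some t1, some t2 => acc ++ [(t1, t2)]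
            | _, _ => acc) = acc ++ pvGA n (pvRotIter (r - 1).toNat ts0) i := by
        intro i hi acc
        rw [PySem.List.mem_pyRange_one] at hi
        have hn2 : (2:Int) ≤ n := by omega
        have hub : i + 1 ≤ PySem.Int.floordiv n 2 := by omega
        have h2i : (i + 1) * 2 ≤ n := by
          rw [← PySem.Int.le_floordiv_iff_mul_le (by omega)]; exact hub
        have hm1 : (restT.length : Int) + (if odd then 1 else 0) = n - 1 := by omega
        have e1 := pvElem t restT hr odd (r - 1) i hk (by omega) (by omega)
        have e2 := pvElem t restT hr odd (r - 1) (n - 1 - i) hk (by omega) (by omega)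
        rw [hm1, ← htimes, ← hts0] at e1 e2
        unfold pvGA
        rw [e1, e2]
        cases pvAtB times odd (r - 1) (n - 1) i <;>
          cases pvAtB times odd (r - 1) (n - 1) (n - 1 - i) <;>
          simp
      rw [PySem.List.foldl_congr_mem _ _ _ _ (fun acc x hx => hrw x hx acc)]
      rw [PySem.List.foldl_append_eq_flatMap]
      simp [pvPairsA]
    · rw [if_neg hcond, if_pos (by omega)]

-- ===== VERDICT (by name: the statement is the Claim_ definition above) =====
theorem gerar_confrontos_round_robin_py_spec : Claim_equal_gerar_confrontos_round_robin_py := by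
  intro times numero_rodada _
  unfold Spec_gerar_confrontos_round_robin_py
  exact main_eq times numero_rodada
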